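-- pv_equiv track=rewrite | github.com/UMR-linsang/pythonProject | 实验八/linsang8_4.py | black_hole
-- ===== SOURCE A (Python) =====
-- def black_hole(n: int) -> int:
--     # 如果 n 位数中出现了重复数字，则不可能是黑洞数
--     if len(set(str(n))) != len(str(n)):
--         return False
--
--     # 将数字的每一位排序，得到最大数和最小数
--     max_num = int(''.join(sorted(str(n), reverse=True)))
--     min_num = int(''.join(sorted(str(n))))
--
--     # 如果最大数减去最小数等于原数，则是黑洞数
--     if max_num - min_num == n:
--         return True
--     # 否则，将差值赋值给 n，继续迭代
--     else:
--         return black_hole(max_num - min_num)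
-- ===== SOURCE B (Python) =====
-- def black_hole(n: int) -> int:
--     while True:
--         t = sorted(str(n))
--         if any(a == b for a, b in zip(t, t[1:])):
--             return False
--         min_num = int(''.join(t))
--         max_num = int(''.join(reversed(t)))
--         diff = max_num - min_num
--         if diff == n:
--             return True
--         n = diff
-- ===== Notes on version B (the rewrite author's own statement) =====
-- stated objective: simpler
-- what changed: Replaces the recursion with a while loop that sorts the digit characters once per step, detects repeated digits by scanning adjacent sorted characters instead of building a set, and forms the max number by reversing the single sorted list instead of sorting a second time in reverse.
import Mathlib
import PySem

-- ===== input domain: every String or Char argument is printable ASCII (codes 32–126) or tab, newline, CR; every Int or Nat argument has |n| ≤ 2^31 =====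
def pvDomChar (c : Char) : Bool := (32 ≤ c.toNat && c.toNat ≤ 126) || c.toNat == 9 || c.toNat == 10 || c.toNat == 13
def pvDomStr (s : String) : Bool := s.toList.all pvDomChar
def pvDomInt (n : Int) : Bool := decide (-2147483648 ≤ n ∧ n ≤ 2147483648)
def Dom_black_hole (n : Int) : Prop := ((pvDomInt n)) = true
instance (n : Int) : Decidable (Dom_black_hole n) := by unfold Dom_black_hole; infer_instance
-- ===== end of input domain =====

-- B replaces A's recursion by a while loop that sorts the digit characters once per step,
-- checks duplicates by scanning adjacent sorted characters instead of building a set, and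
-- gets the max number by reversing the single sorted list instead of a second reverse sort.

-- ===== PORT A =====
-- Python A is unbounded recursion; Lean needs a total function, so the recursion depth is
-- bounded by a fuel argument (100; every input admitted by Pre_ returns within a few steps).
def black_hole_go : Nat → Int → Bool
  | 0, _ => false
  | fuel+1, n =>
    let s := PySem.Int.toChars n
    if PySem.Set.len (PySem.Set.ofList s) ≠ PySem.List.len s then false
    else
      -- int(''.join(sorted(str(n), reverse=True))); .getD 0 is only reached where int() raises, outside Pre_
      let max_num := (PySem.Int.ofChars? (PySem.List.sorted s (fun c => c) true)).getD 0
      let min_num := (PySem.Int.ofChars? (PySem.List.sorted s (fun c => c))).getD 0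
      if max_num - min_num = n then true
      else black_hole_go fuel (max_num - min_num)

def black_hole (n : Int) : Bool := black_hole_go 100 n

-- ===== PORT B =====
def black_hole_alt_go : Nat → Int → Bool
  | 0, _ => false
  | fuel+1, n =>
    let t := PySem.List.sorted (PySem.Int.toChars n) (fun c => c)
    if (t.zip (PySem.List.slice t (some 1) none)).any (fun p => p.1 == p.2) then false
    else
      let min_num := (PySem.Int.ofChars? t).getD 0
      let max_num := (PySem.Int.ofChars? t.reverse).getD 0
      let diff := max_num - min_num
      if diff = n then true
      else black_hole_alt_go fuel diff

def black_hole_alt (n : Int) : Bool := black_hole_alt_go 100 n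

-- ===== PRECONDITION & SPEC =====
-- Python A raises ValueError exactly on negative n whose decimal string has all-distinct
-- characters (the reverse-sorted digit string ends in '-', so int() fails); Pre_ excludes
-- exactly those inputs.  On every other input (every nonnegative n, and negative n whose string has a
-- repeated character, where A returns False at the duplicate check) A returns normally.
def Pre_black_hole (n : Int) : Prop := 0 ≤ n ∨ ¬ (PySem.Int.toChars n).Nodup
instance (n : Int) : Decidable (Pre_black_hole n) := by unfold Pre_black_hole; infer_instance
def pvWitness_black_hole : Int := (495)

def Spec_black_hole (n : Int) (out : Bool) : Prop := out = black_hole_alt n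
instance (n : Int) (out : Bool) : Decidable (Spec_black_hole n out) := by unfold Spec_black_hole; infer_instance

-- ===== CLAIM (what is proved, stated in full; the proofs are below) =====
def Claim_equal_black_hole : Prop := ∀ (n : Int), Dom_black_hole n → Pre_black_hole n → Spec_black_hole n (black_hole n)

-- ===== LEMMAS AND PROOFS =====

-- A's duplicate test: len(set(s)) = len(s) iff s has no repeated element.
lemma pv_len_ofList_eq_iff (s : List Char) :
    (PySem.Set.ofList s).length = s.length ↔ s.Nodup := by
  constructor
  · intro h
    have hfs : (PySem.Set.ofList s).toFinset = s.toFinset := by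
      ext x; simp [List.mem_toFinset, PySem.Set.mem_ofList]
    have hcard : s.toFinset.card = s.length := by
      rw [← hfs, List.toFinset_card_of_nodup (PySem.Set.nodup_ofList s), h]
    have hd : s.dedup.length = s.length := by
      rw [List.card_toFinset] at hcard; exact hcard
    have : s.dedup = s := (List.dedup_sublist s).eq_of_length hd
    exact List.dedup_eq_self.mp this
  · intro h; rw [PySem.Set.ofList_eq_self_of_nodup s h]

-- B's duplicate test: a ≤-sorted list has no equal adjacent pair iff it has no repeated element.
lemma pv_adjacent_nodup (t : List Char) (hp : t.Pairwise (fun a b => a ≤ b)) :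
    ((t.zip (t.drop 1)).any (fun p => p.1 == p.2) = false) ↔ t.Nodup := by
  induction t with
  | nil => simp
  | cons a t ih =>
    cases t with
    | nil => simp
    | cons b r =>
      have hp' : (b :: r).Pairwise (fun a b => a ≤ b) := (List.pairwise_cons.mp hp).2
      have hab : a ≤ b := (List.pairwise_cons.mp hp).1 b (by simp)
      by_cases hEq : a = b
      · subst hEq
        constructor
        · intro h; simp at h
        · intro h; exact absurd (by simp) (List.nodup_cons.mp h).1
      · have hnotmem : (b :: r).Nodup → a ∉ b :: r := by
          intro hnd hmem
          rcases List.mem_cons.mp hmem with h | h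
          · exact hEq h
          · have hba : b ≤ a := (List.pairwise_cons.mp hp').1 a h
            exact hEq (le_antisymm hab hba)
        have ihr := ih hp'
        constructor
        · intro h
          simp only [List.drop_succ_cons, List.drop_zero, List.zip_cons_cons, List.any_cons,
            Bool.or_eq_false_iff] at h
          have hnd : (b :: r).Nodup := ihr.mp (by simpa using h.2)
          exact List.nodup_cons.mpr ⟨hnotmem hnd, hnd⟩
        · intro h
          have hnd := (List.nodup_cons.mp h).2
          simp only [List.drop_succ_cons, List.drop_zero, List.zip_cons_cons, List.any_cons,
            Bool.or_eq_false_iff]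
          exact ⟨by simp [hEq], by simpa using ihr.mpr hnd⟩

-- sorted(s, reverse=True) is the reverse of sorted(s) (both are the ≥-ordered arrangement).
lemma pv_sorted_rev_eq_reverse (s : List Char) :
    PySem.List.sorted s (fun c => c) true = (PySem.List.sorted s (fun c => c)).reverse := by
  refine List.Perm.eq_of_pairwise (le := fun a b : Char => b ≤ a) ?_ ?_ ?_ ?_
  · intro a b _ _ h1 h2; exact le_antisymm h2 h1
  · exact PySem.List.sorted_pairwise_rev s _
  · exact List.pairwise_reverse.mpr (PySem.List.sorted_pairwise s _)
  · exact (PySem.List.sorted_perm s _ true).trans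
      (((List.reverse_perm _).trans (PySem.List.sorted_perm s _ false)).symm)

lemma pv_go_eq (fuel : Nat) : ∀ n : Int, black_hole_go fuel n = black_hole_alt_go fuel n := by
  induction fuel with
  | zero => intro n; rfl
  | succ fuel ih =>
    intro n
    simp only [black_hole_go, black_hole_alt_go]
    generalize PySem.Int.toChars n = s
    rw [PySem.List.slice_from _ (by norm_num : (0:Int) ≤ 1)]
    simp only [Int.toNat_one]
    have hperm : (PySem.List.sorted s (fun c => c)).Nodup ↔ s.Nodup :=
      (PySem.List.sorted_perm s (fun c => c) false).nodup_iff
    have hA : (PySem.Set.len (PySem.Set.ofList s) ≠ PySem.List.len s) ↔ ¬ s.Nodup := by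
      simp only [PySem.Set.len, PySem.List.len, ne_eq, Nat.cast_inj]
      exact not_congr (pv_len_ofList_eq_iff _)
    have hB := pv_adjacent_nodup (PySem.List.sorted s (fun c => c))
      (PySem.List.sorted_pairwise s (fun c => c))
    by_cases hd : s.Nodup
    · have h1 : ¬ (PySem.Set.len (PySem.Set.ofList s) ≠ PySem.List.len s) := fun hc => (hA.mp hc) hd
      have h2 : ¬ (((PySem.List.sorted s (fun c => c)).zip
          ((PySem.List.sorted s (fun c => c)).drop 1)).any (fun p => p.1 == p.2) = true) := by
        rw [hB.mpr (hperm.mpr hd)]; exact Bool.false_ne_true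
      rw [if_neg h1, if_neg h2, pv_sorted_rev_eq_reverse]
      exact if_congr Iff.rfl rfl (ih _)
    · have h2 : (((PySem.List.sorted s (fun c => c)).zip
          ((PySem.List.sorted s (fun c => c)).drop 1)).any (fun p => p.1 == p.2)) = true := by
        cases hany : (((PySem.List.sorted s (fun c => c)).zip
            ((PySem.List.sorted s (fun c => c)).drop 1)).any (fun p => p.1 == p.2)) with
        | false => exact absurd (hperm.mp (hB.mp hany)) hd
        | true => rfl
      rw [if_pos (hA.mpr hd), if_pos h2]

-- ===== VERDICT (by name: the statement is the Claim_ definition above) =====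
theorem black_hole_spec : Claim_equal_black_hole := by
  intro n _ _
  unfold Spec_black_hole black_hole black_hole_alt
  exact pv_go_eq 100 n
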